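-- pv_equiv track=rewrite | github.com/Jackfarmer2328/Memla-v2 | memory_system/distillation/policy_authz_policy_bank.py | _policy_state_primitives
-- ===== SOURCE A (Python) =====
-- _SOFT_RULES = {"outside_change_window", "break_glass_required"}
--
-- _REPAIRABLE_RULES = {"mfa_required", "region_restricted"}
--
-- _HARD_RULES = {"restricted_resource_role", "role_not_permitted"}
--
-- def _policy_state_primitives(rule_hits: list[str]) -> list[str]:
--     normalized = [str(item or "").strip().lower() for item in rule_hits if str(item or "").strip()]
--     seen: set[str] = set()
--     ordered: list[str] = []
--
--     def _add(value: str) -> None: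
--         if value and value not in seen:
--             seen.add(value)
--             ordered.append(value)
--
--     if not normalized:
--         _add("clean_pass_state")
--         return ordered
--
--     hard = [item for item in normalized if item in _HARD_RULES]
--     repairable = [item for item in normalized if item in _REPAIRABLE_RULES]
--     soft = [item for item in normalized if item in _SOFT_RULES]
--
--     if hard and not repairable and not soft:
--         _add("hard_block_state")
--     elif repairable and not hard and not soft:
--         _add("repairable_state")
--     elif soft and not hard and not repairable:
--         _add("soft_review_state")
--     elif hard and soft:
--         _add("mixed_block_review_state")
--     elif repairable and soft:
--         _add("mixed_repair_review_state")
--     else: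
--         _add("mixed_constraint_state")
--
--     if "outside_change_window" in normalized:
--         _add("time_window_constraint")
--     if "break_glass_required" in normalized:
--         _add("approval_gate_constraint")
--     if "mfa_required" in normalized:
--         _add("step_up_identity_constraint")
--     if "region_restricted" in normalized:
--         _add("location_repair_constraint")
--     if "restricted_resource_role" in normalized or "role_not_permitted" in normalized:
--         _add("permission_gap_constraint")
--
--     return ordered
-- ===== SOURCE B (Python) =====
-- # Bitmask-indexed precomputed answer table: each relevant rule gets a bit; the
-- # complete output for every combination is built once at import, so the
-- # function itself is normalization + 6 membership tests + one table index.
--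
-- _BITS = [
--     ("restricted_resource_role", 1),
--     ("role_not_permitted", 2),
--     ("mfa_required", 4),
--     ("region_restricted", 8),
--     ("outside_change_window", 16),
--     ("break_glass_required", 32),
-- ]
--
-- # indexed by code = hard + 2*repairable + 4*soft
-- _STATE_BY_CODE = [
--     "mixed_constraint_state",      # 000
--     "hard_block_state",            # 100
--     "repairable_state",            # 010
--     "mixed_constraint_state",      # 110
--     "soft_review_state",           # 001
--     "mixed_block_review_state",    # 101
--     "mixed_repair_review_state",   # 011
--     "mixed_block_review_state",    # 111
-- ]
--
-- _CONSTRAINT_BITS = [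
--     (16, "time_window_constraint"),
--     (32, "approval_gate_constraint"),
--     (4, "step_up_identity_constraint"),
--     (8, "location_repair_constraint"),
--     (3, "permission_gap_constraint"),
-- ]
--
-- def _entry(mask: int) -> list[str]:
--     code = (1 if mask & 3 else 0) + (2 if mask & 12 else 0) + (4 if mask & 48 else 0)
--     return [_STATE_BY_CODE[code]] + [prim for bit, prim in _CONSTRAINT_BITS if mask & bit]
--
-- _TABLE = [_entry(m) for m in range(64)]
--
-- def _policy_state_primitives(rule_hits: list[str]) -> list[str]:
--     present = {str(item or "").strip().lower() for item in rule_hits if str(item or "").strip()}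
--     if not present:
--         return ["clean_pass_state"]
--     mask = sum(bit for tok, bit in _BITS if tok in present)
--     return _TABLE[mask]
-- ===== Notes on version B (the rewrite author's own statement) =====
-- stated objective: alternative
-- what changed: B assigns each of the six relevant rules a bit, precomputes the complete answer (state plus ordered constraint primitives) for all 64 bitmasks in a table at import time, and at call time just normalizes into a set, sums the present bits and indexes the table, replacing A's three filter passes, six-branch if/elif cascade, five membership ifs and seen/ordered dedup machinery.
import Mathlib
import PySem

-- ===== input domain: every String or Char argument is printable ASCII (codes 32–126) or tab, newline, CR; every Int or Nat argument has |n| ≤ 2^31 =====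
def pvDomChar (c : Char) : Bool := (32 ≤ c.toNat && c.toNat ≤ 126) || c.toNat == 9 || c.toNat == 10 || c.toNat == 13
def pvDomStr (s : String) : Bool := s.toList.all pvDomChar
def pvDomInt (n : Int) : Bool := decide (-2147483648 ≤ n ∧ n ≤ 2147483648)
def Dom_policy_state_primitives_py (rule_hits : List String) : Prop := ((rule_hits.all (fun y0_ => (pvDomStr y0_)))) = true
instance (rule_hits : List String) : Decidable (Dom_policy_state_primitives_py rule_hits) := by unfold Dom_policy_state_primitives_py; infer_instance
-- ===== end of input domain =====

-- B replaces A's filter passes, if/elif cascade and dedup machinery by a bit per relevant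
-- rule and a 64-entry answer table precomputed from the bitmask (objective: simpler).

-- ===== PORT A =====
def pvSoftRulesA : PySem.Set String := PySem.Set.ofList ["outside_change_window", "break_glass_required"]
def pvRepairableRulesA : PySem.Set String := PySem.Set.ofList ["mfa_required", "region_restricted"]
def pvHardRulesA : PySem.Set String := PySem.Set.ofList ["restricted_resource_role", "role_not_permitted"]

/-- A's inner `_add`, threading the (seen, ordered) state. -/
def pvAddA (st : PySem.Set String × List String) (value : String) : PySem.Set String × List String :=
  if value ≠ "" && !(PySem.Set.contains st.1 value) then (PySem.Set.add st.1 value, st.2 ++ [value]) else st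

/-- A's body after the `normalized` comprehension. -/
def pvCoreA (normalized : List String) : List String :=
  let st : PySem.Set String × List String := (PySem.Set.empty, [])
  if normalized.isEmpty then (pvAddA st "clean_pass_state").2
  else
    let hard := normalized.filter (fun item => PySem.Set.contains pvHardRulesA item)
    let repairable := normalized.filter (fun item => PySem.Set.contains pvRepairableRulesA item)
    let soft := normalized.filter (fun item => PySem.Set.contains pvSoftRulesA item)
    let st :=
      if !hard.isEmpty && repairable.isEmpty && soft.isEmpty then pvAddA st "hard_block_state"
      else if !repairable.isEmpty && hard.isEmpty && soft.isEmpty then pvAddA st "repairable_state"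
      else if !soft.isEmpty && hard.isEmpty && repairable.isEmpty then pvAddA st "soft_review_state"
      else if !hard.isEmpty && !soft.isEmpty then pvAddA st "mixed_block_review_state"
      else if !repairable.isEmpty && !soft.isEmpty then pvAddA st "mixed_repair_review_state"
      else pvAddA st "mixed_constraint_state"
    let st := if normalized.contains "outside_change_window" then pvAddA st "time_window_constraint" else st
    let st := if normalized.contains "break_glass_required" then pvAddA st "approval_gate_constraint" else st
    let st := if normalized.contains "mfa_required" then pvAddA st "step_up_identity_constraint" else st
    let st := if normalized.contains "region_restricted" then pvAddA st "location_repair_constraint" else st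
    let st := if normalized.contains "restricted_resource_role" || normalized.contains "role_not_permitted" then
                pvAddA st "permission_gap_constraint" else st
    st.2

def policy_state_primitives_py (rule_hits : List String) : List String :=
  pvCoreA (rule_hits.filterMap (fun item =>
    if PySem.Str.strip item ≠ "" then some (PySem.Str.lower (PySem.Str.strip item)) else none))

-- ===== PORT B =====
def pvBitsB : List (String × Nat) :=
  [ ("restricted_resource_role", 1)
  , ("role_not_permitted", 2)
  , ("mfa_required", 4)
  , ("region_restricted", 8)
  , ("outside_change_window", 16)
  , ("break_glass_required", 32) ]

/-- indexed by code = hard + 2*repairable + 4*soft -/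
def pvStateByCodeB : List String :=
  [ "mixed_constraint_state", "hard_block_state", "repairable_state", "mixed_constraint_state"
  , "soft_review_state", "mixed_block_review_state", "mixed_repair_review_state", "mixed_block_review_state" ]

def pvConstraintBitsB : List (Nat × String) :=
  [ (16, "time_window_constraint")
  , (32, "approval_gate_constraint")
  , (4, "step_up_identity_constraint")
  , (8, "location_repair_constraint")
  , (3, "permission_gap_constraint") ]

/-- B's `_entry(mask)`: output for one bitmask. -/
def pvEntryB (mask : Nat) : List String :=
  let code := (if mask &&& 3 ≠ 0 then 1 else 0) + (if mask &&& 12 ≠ 0 then 2 else 0)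
                + (if mask &&& 48 ≠ 0 then 4 else 0)
  [pvStateByCodeB.getD code ""] ++ pvConstraintBitsB.filterMap (fun p =>
    if mask &&& p.1 ≠ 0 then some p.2 else none)

/-- B's `_TABLE`, precomputed for all 64 masks. -/
def pvTableB : List (List String) := (List.range 64).map pvEntryB

def policy_state_primitives_py_alt (rule_hits : List String) : List String :=
  let present := PySem.Set.ofList (rule_hits.filterMap (fun item =>
    if PySem.Str.strip item ≠ "" then some (PySem.Str.lower (PySem.Str.strip item)) else none))
  if present.isEmpty then ["clean_pass_state"]
  else
    let mask := pvBitsB.foldl (fun acc p => if PySem.Set.contains present p.1 then acc + p.2 else acc) 0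
    pvTableB.getD mask []

-- ===== PRECONDITION & SPEC =====
def Spec_policy_state_primitives_py (rule_hits : List String) (out : List String) : Prop := out = policy_state_primitives_py_alt rule_hits
instance (rule_hits : List String) (out : List String) : Decidable (Spec_policy_state_primitives_py rule_hits out) := by unfold Spec_policy_state_primitives_py; infer_instance

-- ===== CLAIM (what is proved, stated in full; the proofs are below) =====
def Claim_equal_policy_state_primitives_py : Prop := ∀ (rule_hits : List String), Dom_policy_state_primitives_py rule_hits → Spec_policy_state_primitives_py rule_hits (policy_state_primitives_py rule_hits)

-- ===== LEMMAS AND PROOFS =====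

theorem pv_isEmpty_ofList (n : List String) :
    (PySem.Set.ofList n).isEmpty = n.isEmpty := by
  rw [Bool.eq_iff_iff, List.isEmpty_iff, List.isEmpty_iff]
  constructor
  · intro h
    cases n with
    | nil => rfl
    | cons x t =>
        have hx : x ∈ PySem.Set.ofList (x :: t) := (PySem.Set.mem_ofList _ _).mpr List.mem_cons_self
        rw [h] at hx; cases hx
  · intro h; subst h; rfl

theorem pv_contains_ofList (n : List String) (x : String) :
    PySem.Set.contains (PySem.Set.ofList n) x = n.contains x := by
  rw [Bool.eq_iff_iff]
  simp only [PySem.Set.contains, List.contains_iff_mem]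
  exact PySem.Set.mem_ofList n x

theorem pv_filter_pair_isEmpty (n : List String) (a b : String) :
    (n.filter (fun x => x == a || x == b)).isEmpty = (!(n.contains a || n.contains b)) := by
  induction n with
  | nil => rfl
  | cons x t ih =>
    by_cases hx : (x == a || x == b) = true
    · simp [hx]
      rcases Bool.or_eq_true_iff.mp hx with h | h
      · simp [eq_of_beq h]
      · simp [eq_of_beq h]
    · have hxa : ¬ (x = a) := fun e => hx (by simp [e])
      have hxb : ¬ (x = b) := fun e => hx (by simp [e])
      simp [hx, ih, Ne.symm hxa, Ne.symm hxb]

theorem pv_contains_pair (a b x : String) :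
    PySem.Set.contains (PySem.Set.ofList [a, b]) x = (x == a || x == b) := by
  by_cases hab : a = b
  · subst hab; rw [Bool.eq_iff_iff]; simp [PySem.Set.ofList, PySem.Set.add, PySem.Set.contains]
  · rw [Bool.eq_iff_iff]; simp [PySem.Set.ofList, PySem.Set.add, PySem.Set.contains, Ne.symm hab]

theorem pv_filterA (n : List String) (a b : String) :
    (n.filter (fun item => PySem.Set.contains (PySem.Set.ofList [a, b]) item)).isEmpty
      = (!(n.contains a || n.contains b)) := by
  have h : (fun item => PySem.Set.contains (PySem.Set.ofList [a, b]) item)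
      = (fun x => x == a || x == b) := by
    funext x; exact pv_contains_pair a b x
  rw [h, pv_filter_pair_isEmpty]

set_option maxHeartbeats 1000000 in
theorem pv_core_eq (n : List String) :
    pvCoreA n =
      (if (PySem.Set.ofList n).isEmpty then ["clean_pass_state"]
       else
         let mask := pvBitsB.foldl (fun acc p =>
           if PySem.Set.contains (PySem.Set.ofList n) p.1 then acc + p.2 else acc) 0
         pvTableB.getD mask []) := by
  unfold pvCoreA pvHardRulesA pvRepairableRulesA pvSoftRulesA pvBitsB
  simp only [pv_isEmpty_ofList, pv_filterA]
  simp only [pv_contains_ofList]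
  simp only [List.foldl_cons, List.foldl_nil]
  cases hn : n.isEmpty with
  | true => simp [pvAddA]
  | false =>
    rcases h1 : n.contains "restricted_resource_role" <;>
    rcases h2 : n.contains "role_not_permitted" <;>
    rcases h3 : n.contains "mfa_required" <;>
    rcases h4 : n.contains "region_restricted" <;>
    rcases h5 : n.contains "outside_change_window" <;>
    rcases h6 : n.contains "break_glass_required" <;>
      decide

theorem policy_state_primitives_py_spec : Claim_equal_policy_state_primitives_py := by
  intro rule_hits _
  show policy_state_primitives_py rule_hits = policy_state_primitives_py_alt rule_hits
  unfold policy_state_primitives_py policy_state_primitives_py_alt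
  exact pv_core_eq _
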